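-- pv_equiv track=rewrite | github.com/expectedparrot/edsl | edsl/conjure/text_differ.py | find_varying_positions
-- ===== SOURCE A (Python) =====
-- from typing import List
--
-- def find_varying_positions(token_lists: List[List[str]]) -> List[int]:
--     """
--     Find token positions where texts differ.
--
--     Args:
--         token_lists: List of tokenized texts (each is a list of tokens)
--
--     Returns:
--         List of positions (indices) where tokens vary across texts
--     """
--     if not token_lists or len(token_lists) < 2:
--         return []
--
--     # Find the minimum length (in case texts have different token counts)
--     min_len = min(len(tokens) for tokens in token_lists)
--
--     varying_positions = []
--
--     for pos in range(min_len):
--         # Get all tokens at this position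
--         tokens_at_pos = [tokens[pos] for tokens in token_lists if pos < len(tokens)]
--
--         # Check if they're all the same
--         unique_tokens = set(tokens_at_pos)
--         if len(unique_tokens) > 1:
--             varying_positions.append(pos)
--
--     return varying_positions
-- ===== SOURCE B (Python) =====
-- from typing import List
--
-- def find_varying_positions(token_lists: List[List[str]]) -> List[int]:
--     if not token_lists or len(token_lists) < 2:
--         return []
--     ref = token_lists[0]
--     min_len = min(len(tokens) for tokens in token_lists)
--     varying = set()
--     for tokens in token_lists[1:]:
--         for pos in range(min_len):
--             if tokens[pos] != ref[pos]:
--                 varying.add(pos)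
--     return sorted(varying)
-- ===== Notes on version B (the rewrite author's own statement) =====
-- stated objective: alternative
-- what changed: Instead of building, for every position, the list of all tokens there and a set of its distinct members, B fixes token_lists[0] as a reference, loops over the remaining lists accumulating into a single set every position where a list disagrees with the reference, and returns the sorted set.
import Mathlib
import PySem

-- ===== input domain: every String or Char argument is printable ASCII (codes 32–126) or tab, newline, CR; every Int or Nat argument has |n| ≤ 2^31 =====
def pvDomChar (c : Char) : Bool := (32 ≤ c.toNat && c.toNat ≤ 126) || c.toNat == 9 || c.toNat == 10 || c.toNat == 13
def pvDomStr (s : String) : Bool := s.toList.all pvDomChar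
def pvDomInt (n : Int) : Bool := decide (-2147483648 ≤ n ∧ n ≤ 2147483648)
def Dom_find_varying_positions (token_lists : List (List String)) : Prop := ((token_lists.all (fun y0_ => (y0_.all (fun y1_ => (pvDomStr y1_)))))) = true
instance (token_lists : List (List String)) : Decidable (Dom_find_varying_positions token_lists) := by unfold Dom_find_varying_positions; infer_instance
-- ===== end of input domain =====

-- B replaces A's per-position list+set of all tokens by comparison against the first list as a
-- reference: it loops over the remaining lists, accumulates into a set every position where a
-- list disagrees with the reference, and returns the sorted set
-- (objective: alternative decomposition of the same cost).

-- ===== PORT A =====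
def find_varying_positions (token_lists : List (List String)) : List Int :=
  if token_lists = [] ∨ token_lists.length < 2 then []
  else
    let min_len : Int :=
      (PySem.List.min? (token_lists.map (fun tokens => (tokens.length : Int))) (fun v => v)).getD 0
    (PySem.List.pyRange 0 min_len 1).foldl
      (fun varying_positions pos =>
        let tokens_at_pos := token_lists.filterMap
          (fun tokens => if pos < (tokens.length : Int) then PySem.List.pyGet? tokens pos else none)
        let unique_tokens := PySem.Set.ofList tokens_at_pos
        if 1 < PySem.Set.len unique_tokens then varying_positions ++ [pos] else varying_positions)
      []

-- ===== PORT B =====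
def find_varying_positions_alt (token_lists : List (List String)) : List Int :=
  if token_lists = [] ∨ token_lists.length < 2 then []
  else
    let ref := PySem.List.pyGetD token_lists 0 []
    let min_len : Int :=
      (PySem.List.min? (token_lists.map (fun tokens => (tokens.length : Int))) (fun v => v)).getD 0
    let varying := (PySem.List.slice token_lists (some 1) none).foldl
      (fun varying tokens =>
        (PySem.List.pyRange 0 min_len 1).foldl
          (fun varying pos =>
            if PySem.List.pyGetD tokens pos "" ≠ PySem.List.pyGetD ref pos "" then
              PySem.Set.add varying pos
            else varying)
          varying)
      PySem.Set.empty
    PySem.List.sorted varying (fun x => x)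

-- ===== PRECONDITION & SPEC =====
def Spec_find_varying_positions (token_lists : List (List String)) (out : List Int) : Prop := out = find_varying_positions_alt token_lists
instance (token_lists : List (List String)) (out : List Int) : Decidable (Spec_find_varying_positions token_lists out) := by unfold Spec_find_varying_positions; infer_instance

-- ===== CLAIM (what is proved, stated in full; the proofs are below) =====
def Claim_equal_find_varying_positions : Prop := ∀ (token_lists : List (List String)), Dom_find_varying_positions token_lists → Spec_find_varying_positions token_lists (find_varying_positions token_lists)

-- ===== LEMMAS AND PROOFS =====

-- pyGet? agrees with pyGetD on in-range indices
theorem pyGet?_eq_some_pyGetD (l : List String) (i : Int) (h0 : 0 ≤ i) (h1 : i < l.length) :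
    PySem.List.pyGet? l i = some (PySem.List.pyGetD l i "") := by
  obtain ⟨n, rfl⟩ : ∃ n : Nat, i = (n : Int) := ⟨i.toNat, by omega⟩
  rw [PySem.List.pyGet?_natCast, PySem.List.pyGetD_natCast]
  rw [List.getElem?_eq_getElem (by exact_mod_cast h1)]
  simp [List.getD, List.getElem?_eq_getElem (show n < l.length by exact_mod_cast h1)]

-- a nodup list with two distinct members has length > 1
theorem one_lt_length_of_two_mem {α : Type} (l : List α) (a x : α)
    (ha : a ∈ l) (hx : x ∈ l) (hne : a ≠ x) : 1 < l.length := by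
  match l, ha with
  | [b], hb => simp_all
  | b :: c :: r, _ => simp

-- if every element of ys equals a, adding them all to {a} leaves {a}
theorem foldl_add_const (a : String) (ys : List String) (h : ∀ x ∈ ys, x = a) :
    List.foldl PySem.Set.add [a] ys = [a] := by
  induction ys with
  | nil => rfl
  | cons y t ih =>
    have hy : y = a := h y (by simp)
    subst hy
    have : PySem.Set.add [y] y = [y] := by simp [PySem.Set.add]
    simp only [List.foldl_cons, this]
    exact ih (fun x hx => h x (by simp [hx]))

-- A's "more than one distinct token" test, against the first element as reference
theorem one_lt_len_ofList_cons_iff (a : String) (ys : List String) :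
    1 < PySem.Set.len (PySem.Set.ofList (a :: ys)) ↔ ∃ x ∈ ys, x ≠ a := by
  constructor
  · intro h
    by_contra hno
    push Not at hno
    have : PySem.Set.ofList (a :: ys) = [a] := by
      simpa [PySem.Set.ofList, PySem.Set.empty, PySem.Set.add] using foldl_add_const a ys hno
    rw [this] at h
    simp [PySem.Set.len] at h
  · rintro ⟨x, hx, hne⟩
    have hxm : x ∈ PySem.Set.ofList (a :: ys) := (PySem.Set.mem_ofList _ _).mpr (by simp [hx])
    have ham : a ∈ PySem.Set.ofList (a :: ys) := (PySem.Set.mem_ofList _ _).mpr (by simp)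
    have := one_lt_length_of_two_mem _ a x ham hxm (fun h => hne h.symm)
    simp only [PySem.Set.len]
    exact_mod_cast this

-- membership after the inner position loop
theorem mem_foldl_add_if (c : Int → Bool) (ys : List Int) (s : PySem.Set Int) (x : Int) :
    x ∈ ys.foldl (fun s pos => if c pos then PySem.Set.add s pos else s) s ↔
      x ∈ s ∨ (x ∈ ys ∧ c x) := by
  induction ys generalizing s with
  | nil => simp
  | cons y t ih =>
    simp only [List.foldl_cons, ih]
    by_cases hy : c y
    · simp only [hy, if_pos, PySem.Set.mem_add]
      constructor
      · rintro (⟨h | rfl⟩ | h)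
        · exact Or.inl h
        · exact Or.inr ⟨by simp, hy⟩
        · exact Or.inr ⟨by simp [h.1], h.2⟩
      · rintro (h | ⟨hmem, hc⟩)
        · exact Or.inl (Or.inl h)
        · rcases List.mem_cons.mp hmem with rfl | h
          · exact Or.inl (Or.inr rfl)
          · exact Or.inr ⟨h, hc⟩
    · simp only [hy, if_neg, Bool.false_eq_true, not_false_iff]
      constructor
      · rintro (h | h)
        · exact Or.inl h
        · exact Or.inr ⟨by simp [h.1], h.2⟩
      · rintro (h | ⟨hmem, hc⟩)
        · exact Or.inl h
        · rcases List.mem_cons.mp hmem with rfl | h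
          · exact absurd hc (by simp [hy])
          · exact Or.inr ⟨h, hc⟩

-- the inner loop preserves nodup
theorem nodup_foldl_add_if (c : Int → Bool) (ys : List Int) (s : PySem.Set Int)
    (hs : s.Nodup) :
    (ys.foldl (fun s pos => if c pos then PySem.Set.add s pos else s) s).Nodup := by
  induction ys generalizing s with
  | nil => exact hs
  | cons y t ih =>
    simp only [List.foldl_cons]
    by_cases hy : c y
    · simp only [hy, if_pos]
      exact ih _ (PySem.Set.nodup_add s y hs)
    · simp only [hy, Bool.false_eq_true, if_neg, not_false_iff]
      exact ih _ hs

-- membership after the outer loop over the remaining lists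
theorem mem_outer_foldl (c : List String → Int → Bool) (ls : List (List String))
    (rng : List Int) (s : PySem.Set Int) (x : Int) :
    x ∈ ls.foldl (fun s tokens =>
        rng.foldl (fun s pos => if c tokens pos then PySem.Set.add s pos else s) s) s ↔
      x ∈ s ∨ (x ∈ rng ∧ ∃ l ∈ ls, c l x) := by
  induction ls generalizing s with
  | nil => simp
  | cons l t ih =>
    simp only [List.foldl_cons, ih, mem_foldl_add_if]
    constructor
    · rintro ((h | ⟨hr, hc⟩) | ⟨hr, l', hl', hc⟩)
      · exact Or.inl h
      · exact Or.inr ⟨hr, l, by simp, hc⟩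
      · exact Or.inr ⟨hr, l', by simp [hl'], hc⟩
    · rintro (h | ⟨hr, l', hl', hc⟩)
      · exact Or.inl (Or.inl h)
      · rcases List.mem_cons.mp hl' with rfl | hl'
        · exact Or.inl (Or.inr ⟨hr, hc⟩)
        · exact Or.inr ⟨hr, l', hl', hc⟩

-- the outer loop preserves nodup
theorem nodup_outer_foldl (c : List String → Int → Bool) (ls : List (List String))
    (rng : List Int) (s : PySem.Set Int) (hs : s.Nodup) :
    (ls.foldl (fun s tokens =>
        rng.foldl (fun s pos => if c tokens pos then PySem.Set.add s pos else s) s) s).Nodup := by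
  induction ls generalizing s with
  | nil => exact hs
  | cons l t ih =>
    simp only [List.foldl_cons]
    exact ih _ (nodup_foldl_add_if _ _ _ hs)

theorem find_varying_positions_eq (token_lists : List (List String)) :
    find_varying_positions token_lists = find_varying_positions_alt token_lists := by
  unfold find_varying_positions find_varying_positions_alt
  by_cases hguard : token_lists = [] ∨ token_lists.length < 2
  · rw [if_pos hguard, if_pos hguard]
  · rw [if_neg hguard, if_neg hguard]
    push Not at hguard
    obtain ⟨hne, hlen⟩ := hguard
    obtain ⟨r, t, rfl⟩ : ∃ r t, token_lists = r :: t := by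
      cases token_lists with
      | nil => exact absurd rfl hne
      | cons r t => exact ⟨r, t, rfl⟩
    -- min_len facts
    set M : Int :=
      (PySem.List.min? ((r :: t).map (fun tokens => (tokens.length : Int))) (fun v => v)).getD 0 with hM
    obtain ⟨m, hm⟩ : ∃ m, PySem.List.min? ((r :: t).map (fun tokens => (tokens.length : Int)))
        (fun v => v) = some m := by
      cases hmin : PySem.List.min? ((r :: t).map (fun tokens => (tokens.length : Int)))
        (fun v => v) with
      | none => simp [PySem.List.min?_eq_none_iff] at hmin
      | some m => exact ⟨m, rfl⟩
    have hMm : M = m := by rw [hM, hm]; rfl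
    have hbound : ∀ l ∈ r :: t, M ≤ (l.length : Int) := by
      intro l hl
      rw [hMm]
      exact PySem.List.min?_isMin hm _ (List.mem_map.mpr ⟨l, hl, rfl⟩)
    -- the common predicate: some remaining list disagrees with the reference at pos
    have hrefd : PySem.List.pyGetD (r :: t) 0 [] = r := by
      simp [PySem.List.pyGetD_zero_cons]
    rw [hrefd, PySem.List.slice_from_one, List.tail_cons]
    simp only []
    -- A side: the append-if fold is a filter of the range
    rw [show (fun (varying_positions : List Int) (pos : Int) =>
        if 1 < PySem.Set.len (PySem.Set.ofList ((r :: t).filterMap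
            (fun tokens => if pos < (tokens.length : Int) then PySem.List.pyGet? tokens pos
              else none)))
        then varying_positions ++ [pos] else varying_positions) =
      (fun (acc : List Int) (pos : Int) =>
        if (fun pos => decide (1 < PySem.Set.len (PySem.Set.ofList ((r :: t).filterMap
            (fun tokens => if pos < (tokens.length : Int) then PySem.List.pyGet? tokens pos
              else none))))) pos = true
        then acc ++ [(fun (x : Int) => x) pos] else acc) from by
      funext acc pos; simp]
    rw [PySem.List.foldl_append_if]
    simp only [List.nil_append, List.map_id_fun', id]
    -- B side: put the inner loop in the canonical boolean-guard shape
    rw [show (fun (varying : PySem.Set Int) (tokens : List String) =>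
        List.foldl (fun varying pos =>
            if PySem.List.pyGetD tokens pos "" ≠ PySem.List.pyGetD r pos "" then
              PySem.Set.add varying pos
            else varying)
          varying (PySem.List.pyRange 0 M 1)) =
      (fun (s : PySem.Set Int) (tokens : List String) =>
        List.foldl (fun s pos =>
            if (fun (tokens : List String) (pos : Int) =>
                decide (PySem.List.pyGetD tokens pos "" ≠ PySem.List.pyGetD r pos "")) tokens pos
                = true
            then PySem.Set.add s pos else s)
          s (PySem.List.pyRange 0 M 1)) from by
      funext s tokens; simp]
    -- sorted(set) equals the same filter
    apply Eq.symm
    apply PySem.List.sorted_eq_of_perm_of_pairwise_lt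
    · -- permutation: same membership, both nodup
      rw [List.perm_ext_iff_of_nodup
        (List.Nodup.filter _ (PySem.List.nodup_pyRange_one 0 M))
        (nodup_outer_foldl (fun tokens pos =>
            decide (PySem.List.pyGetD tokens pos "" ≠ PySem.List.pyGetD r pos "")) t _
          PySem.Set.empty (show ([] : List Int).Nodup from List.nodup_nil))]
      intro x
      rw [List.mem_filter,
        mem_outer_foldl (fun tokens pos =>
          decide (PySem.List.pyGetD tokens pos "" ≠ PySem.List.pyGetD r pos "")) t _ _ x]
      simp only [PySem.Set.empty, List.not_mem_nil, false_or, decide_eq_true_eq]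
      constructor
      · rintro ⟨hr, hcond⟩
        refine ⟨hr, ?_⟩
        have hx : 0 ≤ x ∧ x < M := PySem.List.mem_pyRange_one.mp hr
        -- unpack A's condition into B's
        have hfm : (r :: t).filterMap
            (fun tokens => if x < (tokens.length : Int) then PySem.List.pyGet? tokens x else none) =
            (r :: t).map (fun tokens => PySem.List.pyGetD tokens x "") := by
          apply List.filterMap_eq_map_iff_forall_eq_some.mpr
          intro l hl
          have hlen' : x < (l.length : Int) := lt_of_lt_of_le hx.2 (hbound l hl)
          rw [if_pos hlen']
          exact pyGet?_eq_some_pyGetD l x hx.1 hlen'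
        rw [hfm] at hcond
        simp only [List.map_cons] at hcond
        have := (one_lt_len_ofList_cons_iff _ _).mp hcond
        obtain ⟨v, hv, hvne⟩ := this
        obtain ⟨l, hl, rfl⟩ := List.mem_map.mp hv
        exact ⟨l, hl, hvne⟩
      · rintro ⟨hr, l, hl, hcond⟩
        refine ⟨hr, ?_⟩
        have hx : 0 ≤ x ∧ x < M := PySem.List.mem_pyRange_one.mp hr
        have hfm : (r :: t).filterMap
            (fun tokens => if x < (tokens.length : Int) then PySem.List.pyGet? tokens x else none) =
            (r :: t).map (fun tokens => PySem.List.pyGetD tokens x "") := by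
          apply List.filterMap_eq_map_iff_forall_eq_some.mpr
          intro l' hl'
          have hlen' : x < (l'.length : Int) := lt_of_lt_of_le hx.2 (hbound l' hl')
          rw [if_pos hlen']
          exact pyGet?_eq_some_pyGetD l' x hx.1 hlen'
        rw [hfm]
        simp only [List.map_cons]
        exact (one_lt_len_ofList_cons_iff _ _).mpr
          ⟨PySem.List.pyGetD l x "", List.mem_map.mpr ⟨l, hl, rfl⟩, hcond⟩
    · exact List.Pairwise.filter _ (PySem.List.pairwise_lt_pyRange_one 0 M)

-- ===== VERDICT (by name: the statement is the Claim_ definition above) =====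
theorem find_varying_positions_spec : Claim_equal_find_varying_positions := by
  intro token_lists _
  unfold Spec_find_varying_positions
  exact find_varying_positions_eq token_lists
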